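-- pv_equiv track=rewrite | github.com/ganeshvaka6/HITECH_CHRISTIAN_CENTER | app.py | pair_rows_for_booking
-- ===== SOURCE A (Python) =====
-- def pair_rows_for_booking(user_code, names_list, mobiles_list, seats_ordered):
--     rows = []
--     n_names = len(names_list)
--     n_mobiles = len(mobiles_list)
--     n_seats = len(seats_ordered)
--
--     for m in mobiles_list:
--         if len(m) < 10:
--             raise ValueError("Invalid mobile number")
--
--     if n_names == n_seats and n_mobiles == n_seats:
--         return [(user_code, names_list[i], mobiles_list[i], seats_ordered[i]) for i in range(n_seats)]
--
--     if n_names == 1 and n_mobiles == 1: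
--         return [(user_code, names_list[0], mobiles_list[0], s) for s in seats_ordered]
--
--     if n_names == 1 and n_mobiles == n_seats:
--         return [(user_code, names_list[0], mobiles_list[i], seats_ordered[i]) for i in range(n_seats)]
--
--     if n_mobiles == 1 and n_names == n_seats:
--         return [(user_code, names_list[i], mobiles_list[0], seats_ordered[i]) for i in range(n_seats)]
--
--     raise ValueError("Cannot pair names/mobiles/seats")
-- ===== SOURCE B (Python) =====
-- def pair_rows_for_booking(user_code, names_list, mobiles_list, seats_ordered):
--     for m in mobiles_list:
--         if len(m) < 10:
--             raise ValueError("Invalid mobile number")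
--
--     n_seats = len(seats_ordered)
--
--     def broadcast(xs):
--         # materialise the column to full length: keep it if already n_seats long,
--         # replicate a singleton, otherwise the lengths cannot be paired
--         if len(xs) == n_seats:
--             return xs
--         if len(xs) == 1:
--             return xs * n_seats
--         raise ValueError("Cannot pair names/mobiles/seats")
--
--     return [(user_code, nm, mb, st)
--             for nm, mb, st in zip(broadcast(names_list), broadcast(mobiles_list), seats_ordered)]
-- ===== Notes on version B (the rewrite author's own statement) =====
-- stated objective: alternative
-- what changed: Instead of A's four-branch cascade of index-based comprehensions, B materialises each column to full length (keep if already n_seats long, replicate a singleton, else raise) and then zips the three equal-length lists into rows.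
import Mathlib
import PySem

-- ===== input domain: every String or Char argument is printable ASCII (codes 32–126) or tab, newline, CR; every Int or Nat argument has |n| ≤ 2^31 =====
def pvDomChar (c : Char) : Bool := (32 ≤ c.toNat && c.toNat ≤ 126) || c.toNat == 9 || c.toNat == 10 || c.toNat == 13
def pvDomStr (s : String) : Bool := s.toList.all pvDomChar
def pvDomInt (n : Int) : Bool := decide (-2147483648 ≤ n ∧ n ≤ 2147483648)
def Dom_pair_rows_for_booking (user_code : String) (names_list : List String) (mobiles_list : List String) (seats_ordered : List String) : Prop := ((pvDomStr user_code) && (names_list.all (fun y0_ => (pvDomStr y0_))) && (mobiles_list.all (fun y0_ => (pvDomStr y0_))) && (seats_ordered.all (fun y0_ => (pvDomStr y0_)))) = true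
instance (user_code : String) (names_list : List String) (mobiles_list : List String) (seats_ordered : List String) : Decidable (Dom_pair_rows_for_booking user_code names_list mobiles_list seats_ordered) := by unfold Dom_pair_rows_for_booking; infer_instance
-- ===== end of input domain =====

-- B materialises each column to full length (replicating a singleton) and zips the three
-- lists, instead of A's four-branch cascade of indexed comprehensions (objective: alternative).
-- A raises ValueError on short mobiles or unpairable lengths; Pre_ excludes exactly those inputs.


-- ===== PORT A =====
-- raise branches return [] ; Pre_ excludes those inputs
def pair_rows_for_booking (user_code : String) (names_list : List String) (mobiles_list : List String) (seats_ordered : List String) : List (String × String × String × String) :=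
  if mobiles_list.any (fun m => PySem.Str.len m < 10) then [] -- raise ValueError("Invalid mobile number")
  else
    let n_names : Int := names_list.length
    let n_mobiles : Int := mobiles_list.length
    let n_seats : Int := seats_ordered.length
    if n_names = n_seats ∧ n_mobiles = n_seats then
      (PySem.List.pyRange 0 n_seats 1).map (fun i =>
        (user_code, PySem.List.pyGetD names_list i "", PySem.List.pyGetD mobiles_list i "", PySem.List.pyGetD seats_ordered i ""))
    else if n_names = 1 ∧ n_mobiles = 1 then
      seats_ordered.map (fun s =>
        (user_code, PySem.List.pyGetD names_list 0 "", PySem.List.pyGetD mobiles_list 0 "", s))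
    else if n_names = 1 ∧ n_mobiles = n_seats then
      (PySem.List.pyRange 0 n_seats 1).map (fun i =>
        (user_code, PySem.List.pyGetD names_list 0 "", PySem.List.pyGetD mobiles_list i "", PySem.List.pyGetD seats_ordered i ""))
    else if n_mobiles = 1 ∧ n_names = n_seats then
      (PySem.List.pyRange 0 n_seats 1).map (fun i =>
        (user_code, PySem.List.pyGetD names_list i "", PySem.List.pyGetD mobiles_list 0 "", PySem.List.pyGetD seats_ordered i ""))
    else [] -- raise ValueError("Cannot pair names/mobiles/seats")

-- ===== PORT B =====
-- broadcast: none = raise ValueError("Cannot pair names/mobiles/seats"); xs * n = (replicate n xs).flatten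
def pvBroadcast (n_seats : Nat) (xs : List String) : Option (List String) :=
  if xs.length = n_seats then some xs
  else if xs.length = 1 then some ((List.replicate n_seats xs).flatten)
  else none

def pair_rows_for_booking_alt (user_code : String) (names_list : List String) (mobiles_list : List String) (seats_ordered : List String) : List (String × String × String × String) :=
  if mobiles_list.any (fun m => PySem.Str.len m < 10) then [] -- raise ValueError("Invalid mobile number")
  else
    let n_seats : Nat := seats_ordered.length
    match pvBroadcast n_seats names_list, pvBroadcast n_seats mobiles_list with
    | some nf, some mf =>
        (nf.zip (mf.zip seats_ordered)).map (fun p => (user_code, p.1, p.2.1, p.2.2))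
    | _, _ => [] -- raise ValueError("Cannot pair names/mobiles/seats")

-- ===== PRECONDITION & SPEC =====
-- Pre_ excludes exactly the inputs where A raises ValueError: a mobile shorter than 10
-- characters, or list lengths that cannot be paired (a count that is neither 1 nor n_seats).
def Pre_pair_rows_for_booking (user_code : String) (names_list : List String) (mobiles_list : List String) (seats_ordered : List String) : Prop :=
  (∀ m ∈ mobiles_list, 10 ≤ m.toList.length) ∧
  (names_list.length = 1 ∨ names_list.length = seats_ordered.length) ∧
  (mobiles_list.length = 1 ∨ mobiles_list.length = seats_ordered.length)
instance (user_code : String) (names_list : List String) (mobiles_list : List String) (seats_ordered : List String) : Decidable (Pre_pair_rows_for_booking user_code names_list mobiles_list seats_ordered) := by unfold Pre_pair_rows_for_booking; infer_instance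

def pvWitness_pair_rows_for_booking : String × List String × List String × List String :=
  ("U7", ["Alice"], ["0123456789", "0123456788"], ["A1", "A2"])

def Spec_pair_rows_for_booking (user_code : String) (names_list : List String) (mobiles_list : List String) (seats_ordered : List String) (out : List (String × String × String × String)) : Prop := out = pair_rows_for_booking_alt user_code names_list mobiles_list seats_ordered
instance (user_code : String) (names_list : List String) (mobiles_list : List String) (seats_ordered : List String) (out : List (String × String × String × String)) : Decidable (Spec_pair_rows_for_booking user_code names_list mobiles_list seats_ordered out) := by unfold Spec_pair_rows_for_booking; infer_instance

-- ===== CLAIM (what is proved, stated in full; the proofs are below) =====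
def Claim_equal_pair_rows_for_booking : Prop := ∀ (user_code : String) (names_list : List String) (mobiles_list : List String) (seats_ordered : List String), Dom_pair_rows_for_booking user_code names_list mobiles_list seats_ordered → Pre_pair_rows_for_booking user_code names_list mobiles_list seats_ordered → Spec_pair_rows_for_booking user_code names_list mobiles_list seats_ordered (pair_rows_for_booking user_code names_list mobiles_list seats_ordered)

-- ===== LEMMAS AND PROOFS =====
theorem pvBroadcast_len {n : Nat} {xs : List String} (h : xs.length = n) :
    pvBroadcast n xs = some xs := by simp [pvBroadcast, h]

theorem pvBroadcast_one {n : Nat} (x : String) :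
    pvBroadcast n [x] = some (List.replicate n x) := by
  unfold pvBroadcast
  split_ifs with h1 <;> simp_all [List.flatten_replicate_singleton]
  subst h1; rfl

theorem pair_rows_for_booking_spec : Claim_equal_pair_rows_for_booking := by
  intro u nl ml sl _ hpre
  obtain ⟨hmob, hn, hm⟩ := hpre
  unfold Spec_pair_rows_for_booking pair_rows_for_booking pair_rows_for_booking_alt
  have hmb : ml.any (fun m => decide (PySem.Str.len m < 10)) = false := by
    rw [List.any_eq_false]
    intro m hmem
    simp only [decide_eq_true_eq, not_lt, PySem.Str.len_eq]
    exact_mod_cast hmob m hmem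
  simp only [hmb, Bool.false_eq_true, if_false]
  rcases hn with hn | hn <;> rcases hm with hm | hm
  · -- names = 1, mobiles = 1
    obtain ⟨x, rfl⟩ := List.length_eq_one_iff.mp hn
    obtain ⟨y, rfl⟩ := List.length_eq_one_iff.mp hm
    rw [pvBroadcast_one, pvBroadcast_one]
    split_ifs with h1 h2 <;> try (exfalso; push_cast at *; omega)
    · -- sl.length = 1: A's equal-lengths branch
      apply List.ext_getElem
      · simp [PySem.List.length_pyRange_one]
      · intro i hA hB
        have hi : i < sl.length := by
          simp [PySem.List.length_pyRange_one] at hA; omega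
        have hi0 : i = 0 := by push_cast at h1; omega
        subst hi0
        rw [List.getElem_map, List.getElem_map, PySem.List.getElem_pyRange_one,
            List.getElem_zip, List.getElem_zip]
        simp [PySem.List.pyGetD_zero, hi]
    · -- broadcast-both branch
      apply List.ext_getElem
      · simp
      · intro i hA hB
        have hi : i < sl.length := by simpa using hA
        rw [List.getElem_map, List.getElem_map, List.getElem_zip, List.getElem_zip]
        simp
  · -- names = 1, mobiles = n
    obtain ⟨x, rfl⟩ := List.length_eq_one_iff.mp hn
    rw [pvBroadcast_one, pvBroadcast_len hm]
    split_ifs with h1 h2 h3 <;> try (exfalso; push_cast at *; omega)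
    · -- sl.length = 1: A's equal-lengths branch
      apply List.ext_getElem
      · simp [PySem.List.length_pyRange_one, hm]
      · intro i hA hB
        have hi : i < sl.length := by
          simp [PySem.List.length_pyRange_one] at hA; omega
        rw [List.getElem_map, List.getElem_map, PySem.List.getElem_pyRange_one,
            List.getElem_zip, List.getElem_zip]
        have hi0 : i = 0 := by push_cast at h1; omega
        subst hi0
        simp [PySem.List.pyGetD_zero, hi, hm]
    · -- names broadcast branch
      apply List.ext_getElem
      · simp [PySem.List.length_pyRange_one, hm]
      · intro i hA hB
        have hi : i < sl.length := by
          simp [PySem.List.length_pyRange_one] at hA; omega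
        rw [List.getElem_map, List.getElem_map, PySem.List.getElem_pyRange_one,
            List.getElem_zip, List.getElem_zip]
        simp [PySem.List.pyGetD_natCast, PySem.List.pyGetD_zero, hi, hm]
  · -- names = n, mobiles = 1
    obtain ⟨y, rfl⟩ := List.length_eq_one_iff.mp hm
    rw [pvBroadcast_len hn, pvBroadcast_one]
    split_ifs with h1 h2 h3 h4 <;> try (exfalso; push_cast at *; omega)
    · -- sl.length = 1: A's equal-lengths branch
      apply List.ext_getElem
      · simp [PySem.List.length_pyRange_one, hn]
      · intro i hA hB
        have hi : i < sl.length := by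
          simp [PySem.List.length_pyRange_one] at hA; omega
        rw [List.getElem_map, List.getElem_map, PySem.List.getElem_pyRange_one,
            List.getElem_zip, List.getElem_zip]
        have hi0 : i = 0 := by push_cast at h1; omega
        subst hi0
        simp [PySem.List.pyGetD_zero, hi, hn]
    · -- mobiles broadcast branch
      apply List.ext_getElem
      · simp [PySem.List.length_pyRange_one, hn]
      · intro i hA hB
        have hi : i < sl.length := by
          simp [PySem.List.length_pyRange_one] at hA; omega
        rw [List.getElem_map, List.getElem_map, PySem.List.getElem_pyRange_one,
            List.getElem_zip, List.getElem_zip]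
        simp [PySem.List.pyGetD_natCast, PySem.List.pyGetD_zero, hi, hn]
  · -- names = n, mobiles = n
    rw [pvBroadcast_len hn, pvBroadcast_len hm]
    split_ifs with h1 <;> try (exfalso; push_cast at *; omega)
    apply List.ext_getElem
    · simp [PySem.List.length_pyRange_one, hn, hm]
    · intro i hA hB
      have hi : i < sl.length := by
        simp [PySem.List.length_pyRange_one] at hA; omega
      rw [List.getElem_map, List.getElem_map, PySem.List.getElem_pyRange_one,
          List.getElem_zip, List.getElem_zip]
      simp [PySem.List.pyGetD_natCast, hi, hn, hm]
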